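-- pv_equiv track=rewrite | github.com/RoberickSanders/b2b-outbound-stack | tools/niche_research.py | replication_score
-- ===== SOURCE A (Python) =====
-- def replication_score(prospect_tam: int) -> int:
--     """Derive replication score from Prospect TAM — the operator's V3 scale.
--
--     Small Prospect TAMs cause list exhaustion within months; large ones
--     allow campaigns to run indefinitely. This score captures that risk.
--     """
--     if prospect_tam is None:
--         return 5  # unknown — neutral
--     tiers = [
--         (1_000_000, 10), (500_000, 9), (300_000, 8), (200_000, 7),
--         (100_000, 6), (50_000, 5), (30_000, 4), (15_000, 3),
--         (5_000, 2),
--     ]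
--     for threshold, score in tiers:
--         if prospect_tam >= threshold:
--             return score
--     return 1
-- ===== SOURCE B (Python) =====
-- import bisect
--
-- _THRESHOLDS = [5_000, 15_000, 30_000, 50_000, 100_000, 200_000, 300_000, 500_000, 1_000_000]
--
-- def replication_score(prospect_tam: int) -> int:
--     """Derive replication score from Prospect TAM via bisection over sorted thresholds."""
--     if prospect_tam is None:
--         return 5  # unknown — neutral
--     return bisect.bisect_right(_THRESHOLDS, prospect_tam) + 1
-- ===== Notes on version B (the rewrite author's own statement) =====
-- stated objective: idiomatic
-- what changed: Replaces the descending linear scan over (threshold, score) tiers with bisect_right on an ascending sorted threshold list, returning the insertion index plus one.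
import Mathlib
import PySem

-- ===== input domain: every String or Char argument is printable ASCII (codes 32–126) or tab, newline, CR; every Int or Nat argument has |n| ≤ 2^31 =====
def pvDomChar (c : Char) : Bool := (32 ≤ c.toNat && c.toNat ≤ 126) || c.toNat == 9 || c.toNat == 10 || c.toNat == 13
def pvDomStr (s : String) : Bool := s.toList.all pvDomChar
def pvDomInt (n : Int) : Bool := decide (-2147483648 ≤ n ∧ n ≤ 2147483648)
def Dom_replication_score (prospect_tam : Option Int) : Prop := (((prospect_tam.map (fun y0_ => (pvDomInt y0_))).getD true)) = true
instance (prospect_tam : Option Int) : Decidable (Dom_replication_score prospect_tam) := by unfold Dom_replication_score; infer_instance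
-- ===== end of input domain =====

-- B: replace the descending linear tier scan with bisect_right on an ascending
-- sorted threshold list (idiomatic; same result, no speed claim).

-- ===== PORT A =====
-- the 'for threshold, score in tiers' loop: return score at the first tier with tam ≥ threshold, else 1
def pvTierLoop (x : Int) : List (Int × Int) → Int
  | [] => 1
  | (threshold, score) :: rest => if x ≥ threshold then score else pvTierLoop x rest

def replication_score (prospect_tam : Option Int) : Int :=
  match prospect_tam with
  | none => 5
  | some x =>
    pvTierLoop x [(1000000, 10), (500000, 9), (300000, 8), (200000, 7),
                  (100000, 6), (50000, 5), (30000, 4), (15000, 3), (5000, 2)]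

-- ===== PORT B =====
def pvThresholds : List Int := [5000, 15000, 30000, 50000, 100000, 200000, 300000, 500000, 1000000]

-- bisect.bisect_right on a sorted list = number of elements ≤ x (the stdlib call, by its contract)
def pvBisectRight (xs : List Int) (x : Int) : Int :=
  (xs.countP (fun t => t ≤ x) : Nat)

def replication_score_alt (prospect_tam : Option Int) : Int :=
  match prospect_tam with
  | none => 5
  | some x => pvBisectRight pvThresholds x + 1

-- ===== PRECONDITION & SPEC =====
def Spec_replication_score (prospect_tam : Option Int) (out : Int) : Prop := out = replication_score_alt prospect_tam
instance (prospect_tam : Option Int) (out : Int) : Decidable (Spec_replication_score prospect_tam out) := by unfold Spec_replication_score; infer_instance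

-- ===== CLAIM (what is proved, stated in full; the proofs are below) =====
def Claim_equal_replication_score : Prop := ∀ (prospect_tam : Option Int), Dom_replication_score prospect_tam → Spec_replication_score prospect_tam (replication_score prospect_tam)

-- ===== LEMMAS AND PROOFS =====

-- ===== VERDICT (by name: the statement is the Claim_ definition above) =====
theorem replication_score_spec : Claim_equal_replication_score := by
  intro p _
  unfold Spec_replication_score
  cases p with
  | none => rfl
  | some x =>
    simp only [replication_score, replication_score_alt, pvTierLoop, pvBisectRight,
      pvThresholds, List.countP_cons, List.countP_nil]
    simp only [ge_iff_le, decide_eq_true_eq]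
    split_ifs <;> push_cast <;> omega
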